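-- pv_equiv track=rewrite | github.com/heyzec/realtime-mahjong-trainer | utils/convert.py | expand_mpsz
-- ===== SOURCE A (Python) =====
-- def expand_mpsz(s: str) -> list[str]:
--     output = []
--     temp = []
--
--     for ch in s:
--         if ch.isdigit():
--             temp.append(ch)
--         elif ch in "mpsz":
--             for ch2 in temp:
--                 output.append(ch2 + ch)
--             temp = []
--         else:
--             raise ValueError(f"The queried hand contains an unrecognised character: {ch}")
--
--     return output
-- ===== SOURCE B (Python) =====
-- def expand_mpsz(s: str) -> list[str]:
--     for ch in s:
--         if not (ch.isdigit() or ch in "mpsz"):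
--             raise ValueError(f"The queried hand contains an unrecognised character: {ch}")
--     res = []
--     nxt = None
--     for i in range(len(s) - 1, -1, -1):
--         ch = s[i]
--         if ch in "mpsz":
--             nxt = ch
--         elif nxt is not None:
--             res.append(ch + nxt)
--     res.reverse()
--     return res
-- ===== Notes on version B (the rewrite author's own statement) =====
-- stated objective: alternative
-- what changed: Replaces the digit buffer that is flushed on each suit character by a validation pass plus a single right-to-left scan that tracks the nearest following suit and pairs each digit with it directly.
-- outside the precondition, e.g. on expand_mpsz('1m2x'): A raises ValueError, B raises ValueError
import Mathlib
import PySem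

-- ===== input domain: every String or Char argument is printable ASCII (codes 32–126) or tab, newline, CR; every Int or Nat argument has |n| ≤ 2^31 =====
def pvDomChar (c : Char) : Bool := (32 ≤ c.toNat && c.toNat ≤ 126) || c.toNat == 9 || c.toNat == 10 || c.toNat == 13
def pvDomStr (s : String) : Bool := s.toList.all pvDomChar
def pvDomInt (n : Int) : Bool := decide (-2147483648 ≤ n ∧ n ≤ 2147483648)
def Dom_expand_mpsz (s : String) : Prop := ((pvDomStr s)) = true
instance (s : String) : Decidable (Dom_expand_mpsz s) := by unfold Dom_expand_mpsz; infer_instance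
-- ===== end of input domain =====

-- B replaces A's flush-on-suit digit buffer with one right-to-left scan tracking the
-- nearest following suit character; same O(n) cost, different control structure.

-- `ch in "mpsz"` for a single char (exact: membership of one char in a 4-char string)
def mpszSuit (ch : Char) : Bool := ch == 'm' || ch == 'p' || ch == 's' || ch == 'z'

-- ===== PORT A =====
-- loop over s with state (output, temp); on an unrecognised char Python raises
-- ValueError (excluded by Pre_), the port returns the accumulated output there.
-- `ch.isdigit()` is Char.isDigit, exact on the ASCII domain.
def expandA : List Char → List String → List Char → List String
  | [], output, _ => output
  | ch :: rest, output, temp =>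
    if ch.isDigit then expandA rest output (temp ++ [ch])
    else if mpszSuit ch then
      expandA rest (output ++ temp.map (fun c => String.ofList [c, ch])) []
    else output

def expand_mpsz (s : String) : List String := expandA s.toList [] []

-- ===== PORT B =====
-- B's validation pass only raises (inputs excluded by Pre_), so it contributes no value;
-- the ported part is B's right-to-left scan with state (nxt, res), then reverse.
def expand_mpsz_alt (s : String) : List String :=
  (s.toList.reverse.foldl
    (fun (st : Option Char × List String) ch =>
      if mpszSuit ch then (some ch, st.2)
      else match st.1 with
        | some su => (st.1, st.2 ++ [String.ofList [ch, su]])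
        | none => st)
    (none, [])).2.reverse

-- ===== PRECONDITION & SPEC =====
-- Pre_ excludes exactly the strings containing a character that is neither a digit nor
-- in "mpsz": there Python A raises ValueError (and B raises the same).
def Pre_expand_mpsz (s : String) : Prop :=
  s.toList.all (fun ch => ch.isDigit || mpszSuit ch) = true
instance (s : String) : Decidable (Pre_expand_mpsz s) := by unfold Pre_expand_mpsz; infer_instance

def pvWitness_expand_mpsz : String := "123m45p6z7"

def Spec_expand_mpsz (s : String) (out : List String) : Prop := out = expand_mpsz_alt s
instance (s : String) (out : List String) : Decidable (Spec_expand_mpsz s out) := by unfold Spec_expand_mpsz; infer_instance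

-- ===== CLAIM (what is proved, stated in full; the proofs are below) =====
def Claim_equal_expand_mpsz : Prop := ∀ (s : String), Dom_expand_mpsz s → Pre_expand_mpsz s → Spec_expand_mpsz s (expand_mpsz s)

-- ===== LEMMAS AND PROOFS =====

-- reference function both ports are reduced to: each non-suit char paired with the
-- first suit char occurring after it
def specFn : List Char → List String
  | [] => []
  | ch :: rest =>
    if mpszSuit ch then specFn rest
    else match rest.find? mpszSuit with
      | some su => String.ofList [ch, su] :: specFn rest
      | none => specFn rest

theorem expandA_out (l : List Char) (o1 o2 : List String) (temp : List Char) :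
    expandA l (o1 ++ o2) temp = o1 ++ expandA l o2 temp := by
  induction l generalizing o2 temp with
  | nil => simp [expandA]
  | cons ch rest ih =>
    simp only [expandA]
    split_ifs with h1 h2
    · exact ih _ _
    · rw [List.append_assoc]; exact ih _ _
    · rfl

theorem expandA_spec (l : List Char) (temp : List Char)
    (hpre : ∀ ch ∈ l, (ch.isDigit || mpszSuit ch) = true) :
    expandA l [] temp =
      (match l.find? mpszSuit with
        | some su => temp.map (fun c => String.ofList [c, su])
        | none => []) ++ specFn l := by
  induction l generalizing temp with
  | nil => simp [expandA, specFn]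
  | cons ch rest ih =>
    have hrest : ∀ c ∈ rest, (c.isDigit || mpszSuit c) = true :=
      fun c hc => hpre c (List.mem_cons_of_mem _ hc)
    have hch := hpre ch (List.mem_cons_self ..)
    by_cases hs : mpszSuit ch
    · have hd : ¬ ch.isDigit := by
        have hs' := hs
        simp only [mpszSuit, Bool.or_eq_true, beq_iff_eq] at hs'
        rcases hs' with ((rfl | rfl) | rfl) | rfl <;> decide
      simp only [expandA, if_neg hd, if_pos hs, List.nil_append]
      have h1 : expandA rest (List.map (fun c => String.ofList [c, ch]) temp) [] =
          List.map (fun c => String.ofList [c, ch]) temp ++ expandA rest [] [] := by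
        conv_lhs => rw [← List.append_nil (List.map (fun c => String.ofList [c, ch]) temp)]
        exact expandA_out rest _ [] []
      rw [h1, ih [] hrest, List.find?_cons_of_pos hs]
      simp only [specFn, if_pos hs, List.map_nil]
      cases hfr : rest.find? mpszSuit <;> simp
    · have hd : ch.isDigit := by
        rcases Bool.or_eq_true_iff.mp hch with h | h
        · exact h
        · exact absurd h hs
      simp only [expandA, if_pos hd, specFn, if_neg hs, List.find?_cons_of_neg hs]
      rw [ih _ hrest]
      cases rest.find? mpszSuit <;> simp

theorem expandB_spec (l : List Char) :
    l.foldr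
      (fun ch (st : Option Char × List String) =>
        if mpszSuit ch then (some ch, st.2)
        else match st.1 with
          | some su => (st.1, st.2 ++ [String.ofList [ch, su]])
          | none => st)
      (none, []) = (l.find? mpszSuit, (specFn l).reverse) := by
  induction l with
  | nil => simp [specFn]
  | cons ch rest ih =>
    simp only [List.foldr_cons, ih]
    by_cases hs : mpszSuit ch
    · simp [hs, specFn, List.find?_cons_of_pos hs]
    · simp only [if_neg hs, specFn, List.find?_cons_of_neg hs]
      cases rest.find? mpszSuit <;> simp

-- ===== VERDICT (by name: the statement is the Claim_ definition above) =====
theorem expand_mpsz_spec : Claim_equal_expand_mpsz := by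
  intro s _ hpre
  unfold Pre_expand_mpsz at hpre
  rw [List.all_eq_true] at hpre
  unfold Spec_expand_mpsz expand_mpsz expand_mpsz_alt
  rw [List.foldl_reverse]
  have hA := expandA_spec s.toList [] hpre
  simp only [List.map_nil] at hA
  rw [hA, expandB_spec]
  cases hfr : s.toList.find? mpszSuit <;> simp
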